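-- pv_equiv track=rewrite | github.com/jonathonreilly/toy-physics | scripts/frontier_teleportation_three_register_cross_encoding.py | encoded_indices_and_etas
-- ===== SOURCE A (Python) =====
-- def coordinate_index(coords: tuple[int, ...], side: int) -> int:
--     index = 0
--     for coord in coords:
--         index = index * side + coord
--     return index
--
-- def encoded_indices_and_etas(
--     dim: int,
--     side: int,
--     cell: tuple[int, ...],
--     logical_axis: int,
--     spectators: tuple[int, ...],
-- ) -> tuple[tuple[int, int], tuple[tuple[int, ...], tuple[int, ...]]]:
--     spectator_axes = tuple(axis for axis in range(dim) if axis != logical_axis)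
--     if len(spectators) != len(spectator_axes):
--         raise ValueError("wrong number of spectator taste bits")
--
--     spectator_by_axis = dict(zip(spectator_axes, spectators))
--     indices: list[int] = []
--     etas: list[tuple[int, ...]] = []
--     for logical_bit in (0, 1):
--         eta = [0] * dim
--         eta[logical_axis] = logical_bit
--         for axis in spectator_axes:
--             eta[axis] = spectator_by_axis[axis]
--         eta_tuple = tuple(eta)
--         coords = tuple(2 * cell[axis] + eta_tuple[axis] for axis in range(dim))
--         indices.append(coordinate_index(coords, side))
--         etas.append(eta_tuple)
--     return (indices[0], indices[1]), (etas[0], etas[1])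
-- ===== SOURCE B (Python) =====
-- def encoded_indices_and_etas(dim, side, cell, logical_axis, spectators):
--     if len(spectators) != sum(1 for axis in range(dim) if axis != logical_axis):
--         raise ValueError("wrong number of spectator taste bits")
--     it = iter(spectators)
--     eta0 = tuple(0 if axis == logical_axis else next(it) for axis in range(dim))
--     eta1 = tuple(1 if axis == logical_axis else eta0[axis] for axis in range(dim))
--     index0 = 0
--     for axis in range(dim):
--         index0 = index0 * side + 2 * cell[axis] + eta0[axis]
--     # the encoded index is linear in eta, so the second index is the first
--     # plus the base-side positional value of the componentwise difference eta1 - eta0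
--     delta = 0
--     for e0, e1 in zip(eta0, eta1):
--         delta = delta * side + (e1 - e0)
--     return (index0, index0 + delta), (eta0, eta1)
-- ===== Notes on version B (the rewrite author's own statement) =====
-- stated objective: alternative
-- what changed: B builds each eta in one comprehension pass over the axes (no spectator_axes tuple, no dict, no per-bit rebuild loop), computes the first index in one fused Horner pass over cell and eta0, and obtains the second index by linearity as index0 plus the base-side positional value of eta1 - eta0, instead of A's second full coords construction and coordinate_index pass.
import Mathlib
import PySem

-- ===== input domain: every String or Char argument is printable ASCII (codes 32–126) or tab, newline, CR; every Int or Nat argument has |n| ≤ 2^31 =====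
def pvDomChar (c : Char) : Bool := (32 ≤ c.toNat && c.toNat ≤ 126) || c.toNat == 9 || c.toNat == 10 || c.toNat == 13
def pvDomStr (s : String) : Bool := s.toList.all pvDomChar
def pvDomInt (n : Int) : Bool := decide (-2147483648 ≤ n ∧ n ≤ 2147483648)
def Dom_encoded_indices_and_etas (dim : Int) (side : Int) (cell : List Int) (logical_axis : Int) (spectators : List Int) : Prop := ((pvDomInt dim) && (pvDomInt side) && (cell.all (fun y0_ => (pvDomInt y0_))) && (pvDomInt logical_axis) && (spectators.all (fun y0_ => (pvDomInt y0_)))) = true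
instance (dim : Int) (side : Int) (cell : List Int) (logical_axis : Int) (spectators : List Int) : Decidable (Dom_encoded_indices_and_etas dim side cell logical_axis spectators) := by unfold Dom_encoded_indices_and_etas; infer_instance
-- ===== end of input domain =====

-- B builds each eta in one comprehension pass (no spectator_axes tuple, no dict, no per-bit rebuild
-- loop), computes the first index in one fused Horner pass, and gets the second by linearity as
-- index0 plus the base-side value of eta1 - eta0; objective: alternative (same cost, plainer shape).

-- ===== PORT A =====
def coordinate_index (coords : List Int) (side : Int) : Int :=
  coords.foldl (fun index coord => index * side + coord) 0

-- body of A's 'for logical_bit in (0, 1)' loop, as a function of logical_bit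
def encoded_body (dim : Int) (side : Int) (cell : List Int) (logical_axis : Int)
    (spectator_axes : List Int) (spectator_by_axis : PySem.Dict Int Int) (logical_bit : Int) :
    Int × List Int :=
  let eta0 := List.replicate dim.toNat 0                                -- eta = [0] * dim
  let eta1 := PySem.List.pySetD eta0 logical_axis logical_bit          -- eta[logical_axis] = logical_bit (in range under Pre_)
  let eta := spectator_axes.foldl
      (fun eta axis => PySem.List.pySetD eta axis (spectator_by_axis.getD axis 0)) eta1
      -- spectator_by_axis[axis]: key always present under Pre_ (getD 0 is the total form)
  let coords := (PySem.List.pyRange 0 dim 1).map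
      (fun axis => 2 * PySem.List.pyGetD cell axis 0 + PySem.List.pyGetD eta axis 0)
  (coordinate_index coords side, eta)

def encoded_indices_and_etas (dim : Int) (side : Int) (cell : List Int) (logical_axis : Int) (spectators : List Int) : (Int × Int) × (List Int × List Int) :=
  let spectator_axes := (PySem.List.pyRange 0 dim 1).filter (fun axis => axis ≠ logical_axis)
  if (spectators.length : Int) ≠ (spectator_axes.length : Int) then
    ((0, 0), ([], []))                                                  -- raise ValueError: outside Pre_
  else
    let spectator_by_axis := PySem.Dict.ofList (spectator_axes.zip spectators)
    let r0 := encoded_body dim side cell logical_axis spectator_axes spectator_by_axis 0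
    let r1 := encoded_body dim side cell logical_axis spectator_axes spectator_by_axis 1
    ((r0.1, r1.1), (r0.2, r1.2))

-- ===== PORT B =====
def encoded_indices_and_etas_alt (dim : Int) (side : Int) (cell : List Int) (logical_axis : Int) (spectators : List Int) : (Int × Int) × (List Int × List Int) :=
  if (spectators.length : Int)
      ≠ (((PySem.List.pyRange 0 dim 1).filter (fun axis => axis ≠ logical_axis)).map
          (fun _ => (1 : Int))).sum then
    ((0, 0), ([], []))                                                  -- raise ValueError: outside Pre_
  else
    -- 'eta0 = tuple(0 if axis == logical_axis else next(it) for axis in range(dim))': the iterator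
    -- comprehension is ported by hand as a fold carrying (built list, rest of the iterator);
    -- exact under the guard above, where next() never hits an exhausted iterator
    let eta0 := ((PySem.List.pyRange 0 dim 1).foldl
        (fun (st : List Int × List Int) axis =>
          if axis = logical_axis then (st.1 ++ [0], st.2)
          else (st.1 ++ [st.2.headD 0], st.2.tail)) ([], spectators)).1
    let eta1 := (PySem.List.pyRange 0 dim 1).map
        (fun axis => if axis = logical_axis then 1 else PySem.List.pyGetD eta0 axis 0)
    let index0 := (PySem.List.pyRange 0 dim 1).foldl
        (fun index0 axis => index0 * side + 2 * PySem.List.pyGetD cell axis 0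
          + PySem.List.pyGetD eta0 axis 0) 0
    let delta := (eta0.zip eta1).foldl (fun d p => d * side + (p.2 - p.1)) 0
    ((index0, index0 + delta), (eta0, eta1))

-- ===== PRECONDITION & SPEC =====
-- Pre_ is exactly the set of inputs on which A returns normally: elsewhere A raises
-- (ValueError on a spectator-count mismatch, IndexError when cell is shorter than dim or
-- when logical_axis falls outside Python's index range of the dim-long eta list).
def Pre_encoded_indices_and_etas (dim : Int) (side : Int) (cell : List Int) (logical_axis : Int) (spectators : List Int) : Prop :=
  1 ≤ dim ∧ -dim ≤ logical_axis ∧ logical_axis < dim ∧ dim ≤ (cell.length : Int) ∧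
    (spectators.length : Int) = (if 0 ≤ logical_axis then dim - 1 else dim)
instance (dim : Int) (side : Int) (cell : List Int) (logical_axis : Int) (spectators : List Int) : Decidable (Pre_encoded_indices_and_etas dim side cell logical_axis spectators) := by unfold Pre_encoded_indices_and_etas; infer_instance

def pvWitness_encoded_indices_and_etas : Int × Int × List Int × Int × List Int := (2, 3, [0, 0], 0, [1])

def Spec_encoded_indices_and_etas (dim : Int) (side : Int) (cell : List Int) (logical_axis : Int) (spectators : List Int) (out : (Int × Int) × (List Int × List Int)) : Prop := out = encoded_indices_and_etas_alt dim side cell logical_axis spectators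
instance (dim : Int) (side : Int) (cell : List Int) (logical_axis : Int) (spectators : List Int) (out : (Int × Int) × (List Int × List Int)) : Decidable (Spec_encoded_indices_and_etas dim side cell logical_axis spectators out) := by unfold Spec_encoded_indices_and_etas; infer_instance

-- ===== CLAIM (what is proved, stated in full; the proofs are below) =====
def Claim_equal_encoded_indices_and_etas : Prop := ∀ (dim : Int) (side : Int) (cell : List Int) (logical_axis : Int) (spectators : List Int), Dom_encoded_indices_and_etas dim side cell logical_axis spectators → Pre_encoded_indices_and_etas dim side cell logical_axis spectators → Spec_encoded_indices_and_etas dim side cell logical_axis spectators (encoded_indices_and_etas dim side cell logical_axis spectators)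

-- ===== LEMMAS AND PROOFS =====

-- Horner fold from an arbitrary accumulator
theorem horner_foldl (side : Int) (S : List Int) : ∀ (a : Int),
    S.foldl (fun i c => i * side + c) a = a * side ^ S.length + S.foldl (fun i c => i * side + c) 0 := by
  induction S with
  | nil => intro a; simp
  | cons c S ih =>
    intro a
    simp only [List.foldl_cons, List.length_cons]
    rw [ih (a * side + c), ih (0 * side + c)]
    ring


theorem coordinate_index_bump (side x : Int) (P S : List Int) :
    coordinate_index (P ++ (x + 1) :: S) side = coordinate_index (P ++ x :: S) side + side ^ S.length := by
  unfold coordinate_index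
  simp only [List.foldl_append, List.foldl_cons]
  rw [horner_foldl side S (P.foldl (fun i c => i * side + c) 0 * side + (x + 1)),
      horner_foldl side S (P.foldl (fun i c => i * side + c) 0 * side + x)]
  ring


theorem block_overwrite (vs : List Int) : ∀ (s : Int) (e : List Int) (v : Int → Int),
    0 ≤ s → s.toNat + vs.length ≤ e.length →
    (∀ (k : Nat), k < vs.length → v (s + k) = vs.getD k 0) →
    (PySem.List.pyRange s (s + vs.length) 1).foldl (fun e a => e.set a.toNat (v a)) e
      = e.take s.toNat ++ vs ++ e.drop (s.toNat + vs.length) := by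
  induction vs with
  | nil =>
    intro s e v hs hle hv
    simp [PySem.List.pyRange_one_eq_nil (le_refl s)]
  | cons w vs ih =>
    intro s e v hs hle hv
    have hcons : PySem.List.pyRange s (s + (w :: vs).length) 1
        = s :: PySem.List.pyRange (s + 1) (s + (w :: vs).length) 1 :=
      PySem.List.pyRange_one_cons (by simp only [List.length_cons]; push_cast; omega)
    rw [hcons]
    simp only [List.foldl_cons]
    have hw : v s = w := by
      have := hv 0 (by simp)
      simpa using this
    rw [hw]
    have hshape : s + ((w :: vs).length : Int) = (s + 1) + (vs.length : Int) := by
      simp; ring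
    rw [hshape]
    rw [ih (s + 1) (e.set s.toNat w) v (by omega)
        (by simp; omega)
        (by intro k hk
            have := hv (k + 1) (by simp; omega)
            rw [show s + 1 + (k : Int) = s + ((k : Nat) + 1 : Nat) by push_cast; ring]
            simpa using this)]
    have hs1 : (s + 1).toNat = s.toNat + 1 := by omega
    rw [hs1]
    rw [List.drop_set, List.take_set]
    rw [if_pos (by omega)]
    have htake : (e.take (s.toNat + 1)).set s.toNat w = e.take s.toNat ++ [w] := by
      have hlen : s.toNat < e.length := by simp at hle; omega
      rw [List.take_add_one, List.getElem?_eq_getElem hlen]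
      have hlt : (e.take s.toNat).length = s.toNat := by simp; omega
      simp only [Option.toList_some]
      rw [List.set_append_right _ _ (by omega), hlt]
      simp
    rw [htake]
    simp only [List.length_cons]
    rw [show s.toNat + (vs.length + 1) = s.toNat + 1 + vs.length by omega]
    simp


-- spectator_axes is the range with the logical axis removed
theorem axes_split (dim logical_axis : Int) (h2 : 0 ≤ logical_axis) (h3 : logical_axis < dim) :
    (PySem.List.pyRange 0 dim 1).filter (fun a => a ≠ logical_axis)
      = PySem.List.pyRange 0 logical_axis 1 ++ PySem.List.pyRange (logical_axis + 1) dim 1 := by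
  have p1 : (PySem.List.pyRange 0 logical_axis 1).filter (fun a => a ≠ logical_axis)
      = PySem.List.pyRange 0 logical_axis 1 :=
    List.filter_eq_self.mpr (by
      intro a ha; simp only [PySem.List.mem_pyRange_one] at ha
      simp only [decide_eq_true_eq]; omega)
  have p2 : (PySem.List.pyRange (logical_axis + 1) dim 1).filter (fun a => a ≠ logical_axis)
      = PySem.List.pyRange (logical_axis + 1) dim 1 :=
    List.filter_eq_self.mpr (by
      intro a ha; simp only [PySem.List.mem_pyRange_one] at ha
      simp only [decide_eq_true_eq]; omega)
  rw [PySem.List.pyRange_one_append 0 logical_axis dim h2 (le_of_lt h3),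
      PySem.List.pyRange_one_cons h3, List.filter_append, List.filter_cons]
  simp only [decide_eq_true_eq, p1, p2]
  simp

theorem etaA_eq (dim logical_axis : Int) (spectators : List Int) (b : Int)
    (h2 : 0 ≤ logical_axis) (h3 : logical_axis < dim) (h4 : (spectators.length : Int) = dim - 1) :
    ((PySem.List.pyRange 0 dim 1).filter (fun a => a ≠ logical_axis)).foldl
        (fun eta axis => PySem.List.pySetD eta axis
          ((PySem.Dict.ofList (((PySem.List.pyRange 0 dim 1).filter (fun a => a ≠ logical_axis)).zip spectators)).getD axis 0))
        (PySem.List.pySetD (List.replicate dim.toNat 0) logical_axis b)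
      = spectators.take logical_axis.toNat ++ b :: spectators.drop logical_axis.toNat := by
  set axes := (PySem.List.pyRange 0 dim 1).filter (fun a => a ≠ logical_axis) with haxdef
  set d := PySem.Dict.ofList (axes.zip spectators) with hddef
  have hax : axes
      = PySem.List.pyRange 0 logical_axis 1 ++ PySem.List.pyRange (logical_axis + 1) dim 1 := by
    rw [haxdef]; exact axes_split dim logical_axis h2 h3
  have hlen1 : (PySem.List.pyRange 0 logical_axis 1).length = logical_axis.toNat := by
    simp [PySem.List.length_pyRange_one]
  have hlen2 : (PySem.List.pyRange (logical_axis + 1) dim 1).length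
      = spectators.length - logical_axis.toNat := by
    rw [PySem.List.length_pyRange_one]; omega
  have haxlen : axes.length = spectators.length := by
    rw [hax, List.length_append, hlen1, hlen2]; omega
  have hL'le : logical_axis.toNat ≤ spectators.length := by omega
  have haxnodup : axes.Nodup := by
    rw [haxdef]; exact List.Nodup.filter _ (PySem.List.nodup_pyRange_one 0 dim)
  have hitems : d.items = axes.zip spectators := by
    have hfst : ((axes.zip spectators).map Prod.fst).Nodup := by
      rw [List.map_fst_zip (le_of_eq haxlen)]; exact haxnodup
    have h := PySem.Dict.items_foldl_insert_fresh
      (axes.zip spectators) Prod.fst Prod.snd PySem.Dict.empty (by intro a _; rfl) hfst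
    rw [hddef]
    simpa using h
  have hlookup : ∀ (i : Nat), i < spectators.length →
      d.getD (axes.getD i 0) 0 = spectators.getD i 0 := by
    intro i hi
    have hia : i < axes.length := by omega
    rw [List.getD_eq_getElem axes 0 hia, List.getD_eq_getElem spectators 0 hi]
    apply PySem.Dict.getD_of_mem_items _ _ (by rw [hddef]; exact PySem.Dict.nodup_keys_ofList _)
    rw [hitems]
    have hz : (axes.zip spectators)[i]'(by rw [List.length_zip]; omega)
        = (axes[i], spectators[i]) := List.getElem_zip
    exact hz ▸ List.getElem_mem _
  have hgetlo : ∀ (k : Nat), k < logical_axis.toNat →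
      d.getD ((0 : Int) + (k : Int)) 0 = spectators.getD k 0 := by
    intro k hk
    have hidx : axes.getD k 0 = (0 : Int) + (k : Int) := by
      have hb1 : k < axes.length := by omega
      have hb2 : k < (PySem.List.pyRange 0 logical_axis 1).length := by omega
      rw [List.getD_eq_getElem axes 0 hb1]
      rw [List.getElem_of_eq hax hb1, List.getElem_append_left hb2,
          PySem.List.getElem_pyRange_one]
    rw [← hidx]
    exact hlookup k (by omega)
  have hgethi : ∀ (k : Nat), k < spectators.length - logical_axis.toNat →
      d.getD (logical_axis + 1 + (k : Int)) 0 = spectators.getD (logical_axis.toNat + k) 0 := by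
    intro k hk
    have hb1 : logical_axis.toNat + k < axes.length := by omega
    have hb2 : logical_axis.toNat + k - (PySem.List.pyRange 0 logical_axis 1).length
        < (PySem.List.pyRange (logical_axis + 1) dim 1).length := by omega
    have hidx : axes.getD (logical_axis.toNat + k) 0 = logical_axis + 1 + (k : Int) := by
      rw [List.getD_eq_getElem axes 0 hb1]
      rw [List.getElem_of_eq hax hb1, List.getElem_append_right (by omega),
          PySem.List.getElem_pyRange_one]
      rw [hlen1]
      omega
    rw [← hidx]
    exact hlookup (logical_axis.toNat + k) (by omega)
  -- the fold itself
  rw [PySem.List.pySetD_of_nonneg _ b h2]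
  rw [PySem.List.foldl_congr_mem axes _ (fun eta a => eta.set a.toNat (d.getD a 0)) _ (by
      intro acc x hx
      have hx0 : 0 ≤ x := by
        rw [hax] at hx
        rcases List.mem_append.mp hx with h | h <;>
          (rw [PySem.List.mem_pyRange_one] at h; omega)
      exact PySem.List.pySetD_of_nonneg _ _ hx0)]
  rw [hax, List.foldl_append]
  have htlen : (spectators.take logical_axis.toNat).length = logical_axis.toNat := by
    rw [List.length_take]; omega
  have he0len : ((List.replicate dim.toNat 0).set logical_axis.toNat b).length = dim.toNat := by
    simp
  -- first block: writes at axes 0..logical_axis-1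
  have hb1 : (PySem.List.pyRange 0 logical_axis 1).foldl
        (fun e a => e.set a.toNat (d.getD a 0))
        ((List.replicate dim.toNat 0).set logical_axis.toNat b)
      = spectators.take logical_axis.toNat
        ++ b :: List.replicate (dim.toNat - logical_axis.toNat - 1) 0 := by
    have hsh : PySem.List.pyRange 0 logical_axis 1
        = PySem.List.pyRange 0 (0 + ((spectators.take logical_axis.toNat).length : Int)) 1 := by
      rw [htlen]; congr 1; omega
    rw [hsh]
    rw [block_overwrite (spectators.take logical_axis.toNat) 0
        ((List.replicate dim.toNat 0).set logical_axis.toNat b)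
        (fun a => d.getD a 0) (le_refl 0)
        (by rw [he0len, htlen]; omega)
        (by intro k hk
            rw [htlen] at hk
            show d.getD ((0 : Int) + (k : Int)) 0 = _
            rw [hgetlo k hk, List.getD_eq_getElem spectators 0 (by omega),
                List.getD_eq_getElem (spectators.take logical_axis.toNat) 0
                  (by rw [htlen]; exact hk), List.getElem_take])]
    have hdrop : ((List.replicate dim.toNat 0).set logical_axis.toNat b).drop logical_axis.toNat
        = b :: List.replicate (dim.toNat - logical_axis.toNat - 1) 0 := by
      rw [List.drop_set, if_neg (lt_irrefl _), Nat.sub_self, List.drop_replicate]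
      obtain ⟨m, hm⟩ : ∃ m, dim.toNat - logical_axis.toNat = m + 1 :=
        ⟨dim.toNat - logical_axis.toNat - 1, by omega⟩
      rw [hm, List.replicate_succ, List.set_cons_zero]
      simp
    rw [htlen]
    simp only [Int.toNat_zero, List.take_zero, Nat.zero_add, List.nil_append]
    rw [hdrop]
  rw [hb1]
  -- second block: writes at axes logical_axis+1..dim-1
  have hdlen : (spectators.drop logical_axis.toNat).length
      = spectators.length - logical_axis.toNat := List.length_drop ..
  have he1len : (spectators.take logical_axis.toNat
      ++ b :: List.replicate (dim.toNat - logical_axis.toNat - 1) 0).length = dim.toNat := by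
    simp only [List.length_append, htlen, List.length_cons, List.length_replicate]
    omega
  have hsh2 : PySem.List.pyRange (logical_axis + 1) dim 1
      = PySem.List.pyRange (logical_axis + 1)
          ((logical_axis + 1) + ((spectators.drop logical_axis.toNat).length : Int)) 1 := by
    rw [hdlen]; congr 1; omega
  rw [hsh2]
  rw [block_overwrite (spectators.drop logical_axis.toNat) (logical_axis + 1)
      (spectators.take logical_axis.toNat
        ++ b :: List.replicate (dim.toNat - logical_axis.toNat - 1) 0)
      (fun a => d.getD a 0) (by omega)
      (by rw [he1len, hdlen]; omega)
      (by intro k hk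
          rw [hdlen] at hk
          show d.getD (logical_axis + 1 + (k : Int)) 0 = _
          rw [hgethi k hk, List.getD_eq_getElem spectators 0 (by omega),
              List.getD_eq_getElem (spectators.drop logical_axis.toNat) 0
                (by rw [hdlen]; exact hk), List.getElem_drop])]
  have htk : (spectators.take logical_axis.toNat
      ++ b :: List.replicate (dim.toNat - logical_axis.toNat - 1) 0).take (logical_axis + 1).toNat
      = spectators.take logical_axis.toNat ++ [b] := by
    rw [show (logical_axis + 1).toNat = logical_axis.toNat + 1 by omega]
    rw [List.take_append, List.take_of_length_le (by rw [htlen]; omega), htlen]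
    rw [show logical_axis.toNat + 1 - logical_axis.toNat = 1 by omega]
    simp
  rw [htk]
  have hdr : (spectators.take logical_axis.toNat
      ++ b :: List.replicate (dim.toNat - logical_axis.toNat - 1) 0).drop
        ((logical_axis + 1).toNat + (spectators.drop logical_axis.toNat).length) = [] :=
    List.drop_eq_nil_of_le (by rw [he1len, hdlen]; omega)
  rw [hdr]
  simp

-- lookups in 'spectators with b inserted at the logical axis'
theorem getD_mid (T D : List Int) (b : Int) (k : Nat) (hk : T.length = k) :
    (T ++ b :: D).getD k 0 = b := by
  subst hk
  rw [List.getD_append_right T _ 0 T.length le_rfl, Nat.sub_self]; rfl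

theorem getD_mid_ne (T D : List Int) (b c : Int) (k : Nat) (h : k ≠ T.length) :
    (T ++ b :: D).getD k 0 = (T ++ c :: D).getD k 0 := by
  rcases Nat.lt_or_ge k T.length with h1 | h1
  · rw [List.getD_append _ _ _ _ h1, List.getD_append _ _ _ _ h1]
  · have h1' : T.length ≤ k := h1
    rw [List.getD_append_right _ _ _ _ h1', List.getD_append_right _ _ _ _ h1']
    obtain ⟨m, hm⟩ : ∃ m, k - T.length = m + 1 := ⟨k - T.length - 1, by omega⟩
    rw [hm, List.getD_cons_succ, List.getD_cons_succ]

-- A's eta loop when the logical axis is negative: every position is a spectator write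
theorem etaA_neg (dim logical_axis : Int) (spectators : List Int) (b : Int)
    (hneg : logical_axis < 0) (h4 : (spectators.length : Int) = dim) :
    ((PySem.List.pyRange 0 dim 1).filter (fun a => a ≠ logical_axis)).foldl
        (fun eta axis => PySem.List.pySetD eta axis
          ((PySem.Dict.ofList (((PySem.List.pyRange 0 dim 1).filter (fun a => a ≠ logical_axis)).zip spectators)).getD axis 0))
        (PySem.List.pySetD (List.replicate dim.toNat 0) logical_axis b)
      = spectators := by
  set axes := (PySem.List.pyRange 0 dim 1).filter (fun a => a ≠ logical_axis) with haxdef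
  set d := PySem.Dict.ofList (axes.zip spectators) with hddef
  have hax : axes = PySem.List.pyRange 0 dim 1 := by
    rw [haxdef]
    exact List.filter_eq_self.mpr (by
      intro a ha; simp only [PySem.List.mem_pyRange_one] at ha
      simp only [decide_eq_true_eq]; omega)
  have haxlen : axes.length = spectators.length := by
    rw [hax, PySem.List.length_pyRange_one]; omega
  have haxnodup : axes.Nodup := by
    rw [haxdef]; exact List.Nodup.filter _ (PySem.List.nodup_pyRange_one 0 dim)
  have hitems : d.items = axes.zip spectators := by
    have hfst : ((axes.zip spectators).map Prod.fst).Nodup := by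
      rw [List.map_fst_zip (le_of_eq haxlen)]; exact haxnodup
    have h := PySem.Dict.items_foldl_insert_fresh
      (axes.zip spectators) Prod.fst Prod.snd PySem.Dict.empty (by intro a _; rfl) hfst
    rw [hddef]
    simpa using h
  have hlookup : ∀ (i : Nat), i < spectators.length →
      d.getD (axes.getD i 0) 0 = spectators.getD i 0 := by
    intro i hi
    have hia : i < axes.length := by omega
    rw [List.getD_eq_getElem axes 0 hia, List.getD_eq_getElem spectators 0 hi]
    apply PySem.Dict.getD_of_mem_items _ _ (by rw [hddef]; exact PySem.Dict.nodup_keys_ofList _)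
    rw [hitems]
    have hz : (axes.zip spectators)[i]'(by rw [List.length_zip]; omega)
        = (axes[i], spectators[i]) := List.getElem_zip
    exact hz ▸ List.getElem_mem _
  have hget : ∀ (k : Nat), k < spectators.length →
      d.getD ((0 : Int) + (k : Int)) 0 = spectators.getD k 0 := by
    intro k hk
    have hb1 : k < axes.length := by omega
    have hidx : axes.getD k 0 = (0 : Int) + (k : Int) := by
      rw [List.getD_eq_getElem axes 0 hb1, List.getElem_of_eq hax hb1,
          PySem.List.getElem_pyRange_one]
    rw [← hidx]
    exact hlookup k hk
  -- convert pySetD to set and overwrite the whole list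
  rw [PySem.List.foldl_congr_mem axes _ (fun eta a => eta.set a.toNat (d.getD a 0)) _ (by
      intro acc x hx
      have hx0 : 0 ≤ x := by
        rw [hax] at hx
        rw [PySem.List.mem_pyRange_one] at hx; omega
      exact PySem.List.pySetD_of_nonneg _ _ hx0)]
  have hsh : axes = PySem.List.pyRange 0 (0 + (spectators.length : Int)) 1 := by
    rw [hax]; congr 1; omega
  rw [hsh]
  rw [block_overwrite spectators 0 (PySem.List.pySetD (List.replicate dim.toNat 0) logical_axis b)
      (fun a => d.getD a 0) (le_refl 0)
      (by rw [PySem.List.length_pySetD, List.length_replicate]; omega)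
      (by intro k hk
          show d.getD ((0 : Int) + (k : Int)) 0 = _
          exact hget k hk)]
  rw [List.drop_eq_nil_of_le (by rw [PySem.List.length_pySetD, List.length_replicate]; omega)]
  simp

-- the iterator comprehension fold over axes that never hit the logical axis
theorem comp_fold (logical_axis : Int) (r : List Int) : ∀ (acc rest : List Int),
    (∀ a ∈ r, a ≠ logical_axis) → r.length ≤ rest.length →
    r.foldl (fun st axis => if axis = logical_axis then (st.1 ++ [0], st.2)
        else (st.1 ++ [st.2.headD 0], st.2.tail)) (acc, rest)
      = (acc ++ rest.take r.length, rest.drop r.length) := by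
  induction r with
  | nil => intro acc rest _ _; simp
  | cons a r ih =>
    intro acc rest hne hlen
    rcases rest with _ | ⟨h, t⟩
    · simp at hlen
    · simp only [List.foldl_cons, if_neg (hne a List.mem_cons_self),
          List.headD_cons, List.tail_cons]
      rw [ih (acc ++ [h]) t (fun x hx => hne x (List.mem_cons_of_mem _ hx))
          (by simp at hlen ⊢; omega)]
      simp [List.take_succ_cons, List.drop_succ_cons]

-- B's eta0 comprehension: spectators with 0 inserted at the logical axis (in-range case)
theorem etaB0_pos (dim logical_axis : Int) (spectators : List Int)
    (h2 : 0 ≤ logical_axis) (h3 : logical_axis < dim) (h4 : (spectators.length : Int) = dim - 1) :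
    ((PySem.List.pyRange 0 dim 1).foldl
        (fun st axis => if axis = logical_axis then (st.1 ++ [0], st.2)
          else (st.1 ++ [st.2.headD 0], st.2.tail)) ([], spectators)).1
      = spectators.take logical_axis.toNat ++ 0 :: spectators.drop logical_axis.toNat := by
  have hsplit : PySem.List.pyRange 0 dim 1
      = PySem.List.pyRange 0 logical_axis 1
        ++ logical_axis :: PySem.List.pyRange (logical_axis + 1) dim 1 := by
    rw [PySem.List.pyRange_one_append 0 logical_axis dim h2 (le_of_lt h3),
        PySem.List.pyRange_one_cons h3]
  rw [hsplit, List.foldl_append]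
  rw [comp_fold logical_axis _ [] spectators
      (by intro a ha; rw [PySem.List.mem_pyRange_one] at ha; omega)
      (by rw [PySem.List.length_pyRange_one]; omega)]
  simp only [PySem.List.length_pyRange_one, sub_zero, List.nil_append, List.foldl_cons]
  simp only [if_true]
  rw [comp_fold logical_axis _ (spectators.take logical_axis.toNat ++ [0])
      (spectators.drop logical_axis.toNat)
      (by intro a ha; rw [PySem.List.mem_pyRange_one] at ha; omega)
      (by rw [PySem.List.length_pyRange_one, List.length_drop]; omega)]
  simp only [PySem.List.length_pyRange_one]
  rw [show (spectators.drop logical_axis.toNat).take (dim - (logical_axis + 1)).toNat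
      = spectators.drop logical_axis.toNat from
      List.take_of_length_le (by rw [List.length_drop]; omega)]
  simp only [List.append_assoc, List.singleton_append]

-- B's eta0 comprehension when the logical axis is negative: just the spectators
theorem etaB0_neg (dim logical_axis : Int) (spectators : List Int)
    (hneg : logical_axis < 0) (h4 : (spectators.length : Int) = dim) :
    ((PySem.List.pyRange 0 dim 1).foldl
        (fun st axis => if axis = logical_axis then (st.1 ++ [0], st.2)
          else (st.1 ++ [st.2.headD 0], st.2.tail)) ([], spectators)).1
      = spectators := by
  rw [comp_fold logical_axis _ [] spectators
      (by intro a ha; rw [PySem.List.mem_pyRange_one] at ha; omega)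
      (by rw [PySem.List.length_pyRange_one]; omega)]
  simp only [List.nil_append]
  rw [List.take_of_length_le (by rw [PySem.List.length_pyRange_one]; omega)]

-- B's eta1 comprehension over eta0 (in-range case): flips the inserted bit to 1
theorem etaB1_pos (dim logical_axis : Int) (spectators : List Int)
    (h2 : 0 ≤ logical_axis) (h3 : logical_axis < dim) (h4 : (spectators.length : Int) = dim - 1) :
    (PySem.List.pyRange 0 dim 1).map
        (fun axis => if axis = logical_axis then 1
          else PySem.List.pyGetD
            (spectators.take logical_axis.toNat ++ 0 :: spectators.drop logical_axis.toNat) axis 0)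
      = spectators.take logical_axis.toNat ++ 1 :: spectators.drop logical_axis.toNat := by
  have htlen : (spectators.take logical_axis.toNat).length = logical_axis.toNat := by
    rw [List.length_take]; omega
  apply List.ext_getElem
  · simp only [List.length_map, PySem.List.length_pyRange_one, List.length_append,
      List.length_cons, List.length_drop, htlen]
    omega
  · intro k h1 h2'
    rw [List.getElem_map]
    rw [PySem.List.getElem_pyRange_one 0 dim k (by simpa using h1)]
    by_cases hk : k = logical_axis.toNat
    · rw [if_pos (by omega)]
      rw [← List.getD_eq_getElem _ 0 h2']
      exact (getD_mid _ _ _ _ (by rw [htlen]; omega)).symm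
    · rw [if_neg (by omega)]
      rw [PySem.List.pyGetD_of_nonneg _ _ (by omega : (0:Int) ≤ 0 + (k:Int))]
      rw [show ((0:Int) + (k:Int)).toNat = k by omega]
      rw [← List.getD_eq_getElem _ 0 h2']
      exact getD_mid_ne _ _ 0 1 k (by rw [htlen]; omega)

-- B's eta1 comprehension when the logical axis is negative: a copy of eta0
theorem etaB1_neg (dim logical_axis : Int) (eta0 : List Int)
    (hneg : logical_axis < 0) (hlen : (eta0.length : Int) = dim) :
    (PySem.List.pyRange 0 dim 1).map
        (fun axis => if axis = logical_axis then 1 else PySem.List.pyGetD eta0 axis 0)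
      = eta0 := by
  rw [List.map_congr_left (g := fun axis => PySem.List.pyGetD eta0 axis 0) (by
      intro a ha; rw [PySem.List.mem_pyRange_one] at ha
      rw [if_neg (by omega)])]
  rw [show dim = ((eta0.length : Nat) : Int) by omega]
  exact PySem.List.map_pyGetD_pyRange_zero' eta0 0

-- encoded_body without its lets (definitional)
theorem encoded_body_eq (dim : Int) (side : Int) (cell : List Int) (logical_axis : Int)
    (spectator_axes : List Int) (spectator_by_axis : PySem.Dict Int Int) (logical_bit : Int) :
    encoded_body dim side cell logical_axis spectator_axes spectator_by_axis logical_bit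
      = (coordinate_index ((PySem.List.pyRange 0 dim 1).map
            (fun axis => 2 * PySem.List.pyGetD cell axis 0
              + PySem.List.pyGetD (spectator_axes.foldl
                  (fun eta axis => PySem.List.pySetD eta axis (spectator_by_axis.getD axis 0))
                  (PySem.List.pySetD (List.replicate dim.toNat 0) logical_axis logical_bit)) axis 0)) side,
         spectator_axes.foldl
           (fun eta axis => PySem.List.pySetD eta axis (spectator_by_axis.getD axis 0))
           (PySem.List.pySetD (List.replicate dim.toNat 0) logical_axis logical_bit)) := rfl

theorem hornerB (dim side : Int) (cell E : List Int) :
    coordinate_index ((PySem.List.pyRange 0 dim 1).map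
        (fun axis => 2 * PySem.List.pyGetD cell axis 0 + PySem.List.pyGetD E axis 0)) side
      = (PySem.List.pyRange 0 dim 1).foldl
          (fun index0 axis => index0 * side + 2 * PySem.List.pyGetD cell axis 0
            + PySem.List.pyGetD E axis 0) 0 := by
  unfold coordinate_index
  rw [List.foldl_map]
  apply PySem.List.foldl_congr_mem
  intro acc x _
  ring

-- B's delta fold over a self-zip: only multiplies the accumulator through
theorem delta_zip_self (side : Int) (D : List Int) : ∀ (a : Int),
    (D.zip D).foldl (fun d p => d * side + (p.2 - p.1)) a = a * side ^ D.length := by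
  induction D with
  | nil => intro a; simp
  | cons x D ih =>
    intro a
    simp only [List.zip_cons_cons, List.foldl_cons, List.length_cons]
    rw [show a * side + (x - x) = a * side by ring, ih (a * side)]
    ring

-- B's delta fold over 'insert 0' zipped with 'insert 1': the positional weight of the slot
theorem delta_zip_insert (side : Int) (T D : List Int) :
    (((T ++ 0 :: D).zip (T ++ 1 :: D)).foldl (fun d p => d * side + (p.2 - p.1)) 0)
      = side ^ D.length := by
  induction T with
  | nil =>
    simp only [List.nil_append, List.zip_cons_cons, List.foldl_cons]
    rw [show (0 : Int) * side + (1 - 0) = 1 by ring, delta_zip_self]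
    ring
  | cons t T ih =>
    simp only [List.cons_append, List.zip_cons_cons, List.foldl_cons]
    rw [show (0 : Int) * side + (t - t) = 0 by ring]
    exact ih

-- ===== VERDICT =====
theorem encoded_indices_and_etas_spec : Claim_equal_encoded_indices_and_etas := by
  intro dim side cell logical_axis spectators hdom hpre
  obtain ⟨h1, hge, h3, h5, h4⟩ := hpre
  unfold Spec_encoded_indices_and_etas
  have haxint : ((((PySem.List.pyRange 0 dim 1).filter (fun a => a ≠ logical_axis)).length : Nat) : Int)
      = if 0 ≤ logical_axis then dim - 1 else dim := by
    by_cases hL : 0 ≤ logical_axis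
    · rw [if_pos hL, axes_split dim logical_axis hL h3, List.length_append,
          PySem.List.length_pyRange_one, PySem.List.length_pyRange_one]
      omega
    · rw [if_neg hL, List.filter_eq_self.mpr (by
          intro a ha; rw [PySem.List.mem_pyRange_one] at ha
          simp only [decide_eq_true_eq]; omega),
        PySem.List.length_pyRange_one]
      omega
  have hsum : (((PySem.List.pyRange 0 dim 1).filter (fun axis => axis ≠ logical_axis)).map
        (fun _ => (1 : Int))).sum
      = ((((PySem.List.pyRange 0 dim 1).filter (fun a => a ≠ logical_axis)).length : Nat) : Int) := by
    rw [PySem.List.sum_map_const_int]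
    ring
  simp only [encoded_indices_and_etas, encoded_indices_and_etas_alt]
  rw [if_neg (show ¬ ((spectators.length : Int)
      ≠ ((((PySem.List.pyRange 0 dim 1).filter (fun a => a ≠ logical_axis)).length : Nat) : Int)) by
    rw [haxint, h4]; exact fun h => h rfl)]
  rw [if_neg (show ¬ ((spectators.length : Int)
      ≠ (((PySem.List.pyRange 0 dim 1).filter (fun axis => axis ≠ logical_axis)).map
          (fun _ => (1 : Int))).sum) by
    rw [hsum, haxint, h4]; exact fun h => h rfl)]
  by_cases hL : 0 ≤ logical_axis
  · -- the logical axis names an axis: bit inserted at logical_axis, delta = its positional weight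
    rw [if_pos hL] at h4
    have htlen : (spectators.take logical_axis.toNat).length = logical_axis.toNat := by
      rw [List.length_take]; omega
    rw [encoded_body_eq, encoded_body_eq,
        etaA_eq dim logical_axis spectators 0 hL h3 h4,
        etaA_eq dim logical_axis spectators 1 hL h3 h4,
        etaB0_pos dim logical_axis spectators hL h3 h4,
        etaB1_pos dim logical_axis spectators hL h3 h4]
    have hbump : coordinate_index ((PySem.List.pyRange 0 dim 1).map
          (fun axis => 2 * PySem.List.pyGetD cell axis 0 + PySem.List.pyGetD
            (spectators.take logical_axis.toNat ++ 1 :: spectators.drop logical_axis.toNat) axis 0)) side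
        = coordinate_index ((PySem.List.pyRange 0 dim 1).map
            (fun axis => 2 * PySem.List.pyGetD cell axis 0 + PySem.List.pyGetD
              (spectators.take logical_axis.toNat ++ 0 :: spectators.drop logical_axis.toNat) axis 0)) side
          + side ^ (spectators.drop logical_axis.toNat).length := by
      have hsplit : PySem.List.pyRange 0 dim 1
          = PySem.List.pyRange 0 logical_axis 1
            ++ logical_axis :: PySem.List.pyRange (logical_axis + 1) dim 1 := by
        rw [PySem.List.pyRange_one_append 0 logical_axis dim hL (le_of_lt h3),
            PySem.List.pyRange_one_cons h3]
      rw [hsplit, List.map_append, List.map_append, List.map_cons, List.map_cons]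
      have hoff : ∀ (a : Int), 0 ≤ a → a ≠ logical_axis →
          PySem.List.pyGetD (spectators.take logical_axis.toNat
              ++ 1 :: spectators.drop logical_axis.toNat) a 0
            = PySem.List.pyGetD (spectators.take logical_axis.toNat
              ++ 0 :: spectators.drop logical_axis.toNat) a 0 := by
        intro a ha hne
        rw [PySem.List.pyGetD_of_nonneg _ _ ha, PySem.List.pyGetD_of_nonneg _ _ ha]
        exact getD_mid_ne _ _ _ _ _ (by rw [htlen]; omega)
      have hpre2 : (PySem.List.pyRange 0 logical_axis 1).map
            (fun axis => 2 * PySem.List.pyGetD cell axis 0 + PySem.List.pyGetD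
              (spectators.take logical_axis.toNat ++ 1 :: spectators.drop logical_axis.toNat) axis 0)
          = (PySem.List.pyRange 0 logical_axis 1).map
            (fun axis => 2 * PySem.List.pyGetD cell axis 0 + PySem.List.pyGetD
              (spectators.take logical_axis.toNat ++ 0 :: spectators.drop logical_axis.toNat) axis 0) := by
        apply List.map_congr_left
        intro a ha
        rw [PySem.List.mem_pyRange_one] at ha
        rw [hoff a (by omega) (by omega)]
      have hsuf : (PySem.List.pyRange (logical_axis + 1) dim 1).map
            (fun axis => 2 * PySem.List.pyGetD cell axis 0 + PySem.List.pyGetD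
              (spectators.take logical_axis.toNat ++ 1 :: spectators.drop logical_axis.toNat) axis 0)
          = (PySem.List.pyRange (logical_axis + 1) dim 1).map
            (fun axis => 2 * PySem.List.pyGetD cell axis 0 + PySem.List.pyGetD
              (spectators.take logical_axis.toNat ++ 0 :: spectators.drop logical_axis.toNat) axis 0) := by
        apply List.map_congr_left
        intro a ha
        rw [PySem.List.mem_pyRange_one] at ha
        rw [hoff a (by omega) (by omega)]
      rw [hpre2, hsuf]
      have hmid1 : PySem.List.pyGetD (spectators.take logical_axis.toNat
            ++ 1 :: spectators.drop logical_axis.toNat) logical_axis 0 = 1 :=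
        (PySem.List.pyGetD_of_nonneg _ _ hL).trans (getD_mid _ _ _ _ htlen)
      have hmid0 : PySem.List.pyGetD (spectators.take logical_axis.toNat
            ++ 0 :: spectators.drop logical_axis.toNat) logical_axis 0 = 0 :=
        (PySem.List.pyGetD_of_nonneg _ _ hL).trans (getD_mid _ _ _ _ htlen)
      rw [hmid1, hmid0]
      rw [show 2 * PySem.List.pyGetD cell logical_axis 0 + 1
          = (2 * PySem.List.pyGetD cell logical_axis 0 + 0) + 1 by ring]
      rw [coordinate_index_bump]
      congr 1
      rw [List.length_map, PySem.List.length_pyRange_one, List.length_drop]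
      congr 1
      omega
    rw [hbump, hornerB, delta_zip_insert]
  · -- the logical axis names no axis: the spectator writes cover every position, the delta is 0
    rw [if_neg hL] at h4
    have hneg : logical_axis < 0 := by omega
    rw [encoded_body_eq, encoded_body_eq,
        etaA_neg dim logical_axis spectators 0 hneg h4,
        etaA_neg dim logical_axis spectators 1 hneg h4,
        etaB0_neg dim logical_axis spectators hneg h4,
        etaB1_neg dim logical_axis spectators hneg h4,
        delta_zip_self]
    rw [hornerB]
    simp
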